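-- pv_equiv track=rewrite | github.com/grace-lovell/cs-325-bioinformatics | group_assignment_1a.py | AnnotateValidPromoters
-- ===== SOURCE A (Python) =====
-- def AnnotateValidPromoters(DNA: str, validPromoters):
--     inserts = {}  # for mapping brackets to index where it should be inserted (brackets inserted before index / see line 40, 41)
--     append_end = []  # needed in case a bracket needs to be added at the end of the DNA string
--     # This function inserts the brackets into the DNA sequence
--     def add_insert(position, bracket):
--         if position == len(DNA):
--             append_end.append(bracket)
--         else:
--             if position not in inserts:
--                 inserts[position] = []
--             inserts[position].append(bracket)
--
--     for startSegment, endSegment in validPromoters: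
--         add_insert(startSegment, " [ ")
--         add_insert(startSegment + 6, " ] ")
--         add_insert(endSegment, " [ ")
--         add_insert(endSegment + 6, " ] ")
--
--     out = []
--     for index, nucleotide in enumerate(DNA):
--         if index in inserts:
--             out.append("".join(inserts[index]))
--         out.append(nucleotide)
--
--     if append_end:
--         out.append("".join(append_end))
--
--     return "".join(out)
-- ===== SOURCE B (Python) =====
-- def AnnotateValidPromoters(DNA: str, validPromoters):
--     # Event-list approach: gather (position, bracket) insertion events in
--     # processing order, keep only positions inside [0, len(DNA)], stable-sort
--     # them by position, then rebuild the string once with a moving cursor.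
--     n = len(DNA)
--     events = []
--     for startSegment, endSegment in validPromoters:
--         for p, b in ((startSegment, " [ "), (startSegment + 6, " ] "),
--                      (endSegment, " [ "), (endSegment + 6, " ] ")):
--             if 0 <= p <= n:
--                 events.append((p, b))
--     events.sort(key=lambda e: e[0])  # stable: same-position events keep order
--     parts = []
--     prev = 0
--     for p, b in events:
--         parts.append(DNA[prev:p])
--         parts.append(b)
--         prev = p
--     parts.append(DNA[prev:])
--     return "".join(parts)
-- ===== Notes on version B (the rewrite author's own statement) =====
-- stated objective: faster
-- what changed: B replaces A's position-keyed dict of bracket lists (plus a separate end-of-string list and a per-character membership-test output pass) with a flat event list of (position, bracket) pairs that is stable-sorted by position and replayed once over the DNA with a moving cursor and slices, copying untouched stretches in bulk instead of character by character.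
import Mathlib
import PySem

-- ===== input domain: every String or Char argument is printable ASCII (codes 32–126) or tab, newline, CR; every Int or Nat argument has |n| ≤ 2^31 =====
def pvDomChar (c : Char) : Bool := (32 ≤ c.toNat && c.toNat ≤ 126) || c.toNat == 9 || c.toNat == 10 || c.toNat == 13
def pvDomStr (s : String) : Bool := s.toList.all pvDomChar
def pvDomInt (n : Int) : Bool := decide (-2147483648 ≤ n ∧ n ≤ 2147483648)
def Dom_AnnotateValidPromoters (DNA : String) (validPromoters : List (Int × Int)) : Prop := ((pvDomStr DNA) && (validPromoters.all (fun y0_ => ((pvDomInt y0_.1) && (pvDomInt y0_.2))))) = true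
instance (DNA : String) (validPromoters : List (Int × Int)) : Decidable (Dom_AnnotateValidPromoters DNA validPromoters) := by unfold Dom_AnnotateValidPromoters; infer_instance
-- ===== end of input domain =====

-- B replaces A's position-keyed dict of bracket lists (plus a separate end-of-string list and a
-- per-character membership-test pass) with a flat in-range event list, stable-sorted by position
-- and replayed once over the DNA with a moving cursor and slices (measured faster in a timing run).

-- ===== PORT A =====
-- Python's `if position not in inserts: inserts[position] = []` followed by
-- `inserts[position].append(bracket)` is exactly Dict.modify position [] (· ++ [bracket]).
def pvAddInsert (n : Int) (st : PySem.Dict Int (List String) × List String)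
    (pos : Int) (b : String) : PySem.Dict Int (List String) × List String :=
  if pos == n then (st.1, st.2 ++ [b])
  else (st.1.modify pos [] (fun l => l ++ [b]), st.2)

def AnnotateValidPromoters (DNA : String) (validPromoters : List (Int × Int)) : String :=
  let n : Int := PySem.Str.len DNA
  let st := validPromoters.foldl (fun st se =>
      pvAddInsert n (pvAddInsert n (pvAddInsert n (pvAddInsert n st se.1 " [ ")
        (se.1 + 6) " ] ") se.2 " [ ") (se.2 + 6) " ] ")
    (PySem.Dict.empty, [])
  let out := (PySem.List.enumerate DNA.toList).foldl (fun out ic =>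
      (if st.1.contains ic.1 then out ++ [PySem.Str.join "" (st.1.getD ic.1 [])] else out)
        ++ [String.singleton ic.2]) []
  let out := if st.2.isEmpty then out else out ++ [PySem.Str.join "" st.2]
  PySem.Str.join "" out

-- ===== PORT B =====
def AnnotateValidPromoters_alt (DNA : String) (validPromoters : List (Int × Int)) : String :=
  let n : Int := PySem.Str.len DNA
  let events := validPromoters.foldl (fun ev se =>
      [(se.1, " [ "), (se.1 + 6, " ] "), (se.2, " [ "), (se.2 + 6, " ] ")].foldl
        (fun ev pb => if 0 ≤ pb.1 ∧ pb.1 ≤ n then ev ++ [pb] else ev) ev) []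
  let events := PySem.List.sorted events (fun e => e.1) false
  let st := events.foldl (fun (st : List String × Int) pb =>
      (st.1 ++ [PySem.Str.slice DNA (some st.2) (some pb.1)] ++ [pb.2], pb.1)) ([], 0)
  PySem.Str.join "" (st.1 ++ [PySem.Str.slice DNA (some st.2) none])

-- ===== PRECONDITION & SPEC =====
def Spec_AnnotateValidPromoters (DNA : String) (validPromoters : List (Int × Int)) (out : String) : Prop := out = AnnotateValidPromoters_alt DNA validPromoters
instance (DNA : String) (validPromoters : List (Int × Int)) (out : String) : Decidable (Spec_AnnotateValidPromoters DNA validPromoters out) := by unfold Spec_AnnotateValidPromoters; infer_instance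

-- ===== CLAIM (what is proved, stated in full; the proofs are below) =====
def Claim_equal_AnnotateValidPromoters : Prop := ∀ (DNA : String) (validPromoters : List (Int × Int)), Dom_AnnotateValidPromoters DNA validPromoters → Spec_AnnotateValidPromoters DNA validPromoters (AnnotateValidPromoters DNA validPromoters)

-- ===== LEMMAS AND PROOFS =====

-- the four events a single promoter pair generates, in A's processing order
def pvEvs (se : Int × Int) : List (Int × String) :=
  [(se.1, " [ "), (se.1 + 6, " ] "), (se.2, " [ "), (se.2 + 6, " ] ")]

-- brackets at one insertion point, in event order (proof-side abbreviation)
def pvMarksAt (events : List (Int × String)) (i : Int) : String :=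
  PySem.Str.join "" ((events.filter (fun pb => pb.1 == i)).map (fun pb => pb.2))

-- B's cursor replay, as a structural recursion (proof-side)
def pvCur (DNA : String) : List (Int × String) → Nat → String
  | [], c => PySem.Str.slice DNA (some (c : Int)) none
  | pb :: L, c =>
      PySem.Str.slice DNA (some (c : Int)) (some pb.1) ++ pb.2 ++ pvCur DNA L pb.1.toNat

-- the common reference shape: per position c..n-1 its marks + character, then the marks at n
def pvR (DNA : String) (E : List (Int × String)) (c : Nat) : String :=
  PySem.Str.join "" ((List.range' c (DNA.toList.length - c)).map
    (fun (i : Nat) => pvMarksAt E (i : Int) ++ String.singleton (DNA.toList.getD i ' ')))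
  ++ pvMarksAt E ((DNA.toList.length : Nat) : Int)

-- char-level: joining on the empty separator is flatten
theorem pv_cjoin_flatten (l : List (List Char)) : PySem.Chars.join [] l = l.flatten := by
  induction l with
  | nil => simp [PySem.Chars.join_nil]
  | cons a t ih =>
      cases t with
      | nil => simp [PySem.Chars.join_singleton]
      | cons b t2 => simp [PySem.Chars.join_cons_cons, ih]

theorem pv_sjoin_append (xs ys : List String) :
    PySem.Str.join "" (xs ++ ys) = PySem.Str.join "" xs ++ PySem.Str.join "" ys := by
  apply String.toList_inj.mp
  simp [PySem.Str.toList_join, pv_cjoin_flatten]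

theorem pv_sjoin_nil : PySem.Str.join "" ([] : List String) = "" := by decide

theorem pv_sjoin_singleton (x : String) : PySem.Str.join "" [x] = x := by
  apply String.toList_inj.mp
  simp [PySem.Str.toList_join]

theorem pv_sjoin_cons (x : String) (l : List String) :
    PySem.Str.join "" (x :: l) = x ++ PySem.Str.join "" l := by
  apply String.toList_inj.mp
  simp [PySem.Str.toList_join, pv_cjoin_flatten]

theorem pv_sjoin_snoc (l : List String) (x : String) :
    PySem.Str.join "" (l ++ [x]) = PySem.Str.join "" l ++ x := by
  rw [pv_sjoin_append, pv_sjoin_singleton]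

theorem pv_append_empty (s : String) : s ++ "" = s := by
  apply String.toList_inj.mp; simp

theorem pv_empty_append (s : String) : "" ++ s = s := by
  apply String.toList_inj.mp; simp

-- ---------- A-side lemmas ----------

-- the promoter fold is the event fold over the flattened event list
theorem pv_fold4_eq (n : Int) (vp : List (Int × Int))
    (st0 : PySem.Dict Int (List String) × List String) :
    vp.foldl (fun st se =>
      pvAddInsert n (pvAddInsert n (pvAddInsert n (pvAddInsert n st se.1 " [ ")
        (se.1 + 6) " ] ") se.2 " [ ") (se.2 + 6) " ] ") st0
    = (vp.flatMap pvEvs).foldl (fun st p => pvAddInsert n st p.1 p.2) st0 := by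
  induction vp generalizing st0 with
  | nil => rfl
  | cons se rest ih => simp [pvEvs, List.flatMap_cons, List.foldl_cons, ih]

-- the event fold splits into the dict part (positions ≠ n) and the end part (positions = n)
theorem pv_state_split (n : Int) (E : List (Int × String))
    (d : PySem.Dict Int (List String)) (ae : List String) :
    E.foldl (fun st p => pvAddInsert n st p.1 p.2) (d, ae)
    = ((E.filter (fun p => !(p.1 == n))).foldl (fun d p => d.modify p.1 [] (fun l => l ++ [p.2])) d,
       ae ++ (E.filter (fun p => p.1 == n)).map (fun p => p.2)) := by
  induction E generalizing d ae with
  | nil => simp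
  | cons p rest ih =>
      rw [List.foldl_cons]
      by_cases h : p.1 = n
      · rw [show pvAddInsert n (d, ae) p.1 p.2 = (d, ae ++ [p.2]) by simp [pvAddInsert, h], ih]
        simp [h]
      · rw [show pvAddInsert n (d, ae) p.1 p.2 = (d.modify p.1 [] (fun l => l ++ [p.2]), ae) by
              simp [pvAddInsert, h], ih]
        simp [h]

-- contains of the grouping fold
theorem pv_contains_fold (l : List (Int × String)) (d : PySem.Dict Int (List String)) (i : Int) :
    (l.foldl (fun d p => d.modify p.1 [] (fun l => l ++ [p.2])) d).contains i
    = (d.contains i || l.any (fun p => p.1 == i)) := by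
  induction l generalizing d with
  | nil => simp
  | cons p rest ih =>
      rw [List.foldl_cons, ih, PySem.Dict.contains_modify, List.any_cons]
      by_cases h : p.1 = i
      · simp [h]
      · have h1 : (i == p.1) = false := by simp [Ne.symm h]
        have h2 : (p.1 == i) = false := by simp [h]
        rw [h1, h2, Bool.false_or, Bool.false_or]

-- the dict's stored list at i ≠ n is the event scan at position i
theorem pv_getD_fold (n : Int) (E : List (Int × String)) (i : Int) (hi : i ≠ n) :
    ((E.filter (fun p => !(p.1 == n))).foldl
        (fun d p => d.modify p.1 [] (fun l => l ++ [p.2])) PySem.Dict.empty).getD i []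
      = (E.filter (fun pb => pb.1 == i)).map (fun pb => pb.2) := by
  rw [PySem.Dict.getD_foldl_modify_append]
  simp only [PySem.Dict.getD_empty, List.nil_append, List.filter_filter]
  congr 1
  apply List.filter_congr
  intro x _
  by_cases h : x.1 = i
  · simp [h, hi]
  · simp [h]

theorem pv_not_contains_marks (n : Int) (E : List (Int × String)) (i : Int)
    (h : ((E.filter (fun p => !(p.1 == n))).foldl
        (fun d p => d.modify p.1 [] (fun l => l ++ [p.2])) PySem.Dict.empty).contains i = false)
    (hi : i ≠ n) :
    pvMarksAt E i = "" := by
  rw [pv_contains_fold] at h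
  simp only [PySem.Dict.contains_empty, Bool.false_or, List.any_eq_false, List.mem_filter] at h
  have hfil : E.filter (fun pb => pb.1 == i) = [] := by
    apply List.filter_eq_nil_iff.mpr
    intro p hp
    by_cases hpn : p.1 = n
    · simp [hpn, Ne.symm hi]
    · intro hc
      exact absurd (h p ⟨hp, by simp [hpn]⟩) (by simp [hc])
  rw [pvMarksAt, hfil]
  simpa using pv_sjoin_nil

-- A's output pass, joined
theorem pv_outA (n : Int) (E : List (Int × String)) (l : List (Int × Char)) (out : List String)
    (h : ∀ p ∈ l, p.1 ≠ n) :
    PySem.Str.join "" (l.foldl (fun out ic =>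
        (if ((E.filter (fun p => !(p.1 == n))).foldl
              (fun d p => d.modify p.1 [] (fun l => l ++ [p.2])) PySem.Dict.empty).contains ic.1
          then out ++ [PySem.Str.join ""
            (((E.filter (fun p => !(p.1 == n))).foldl
              (fun d p => d.modify p.1 [] (fun l => l ++ [p.2])) PySem.Dict.empty).getD ic.1 [])]
          else out) ++ [String.singleton ic.2]) out)
    = PySem.Str.join "" out
      ++ PySem.Str.join "" (l.map (fun ic => pvMarksAt E ic.1 ++ String.singleton ic.2)) := by
  induction l generalizing out with
  | nil => simp [pv_sjoin_nil]
  | cons p rest ih =>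
      have hp : p.1 ≠ n := h p (by simp)
      rw [List.foldl_cons, ih _ (fun q hq => h q (by simp [hq]))]
      cases hc : ((E.filter (fun p => !(p.1 == n))).foldl
          (fun d p => d.modify p.1 [] (fun l => l ++ [p.2])) PySem.Dict.empty).contains p.1
      · rw [if_neg (by simp)]
        simp only [List.map_cons]
        rw [pv_sjoin_snoc, pv_sjoin_cons, pv_not_contains_marks n E p.1 hc hp,
          pv_empty_append, String.append_assoc]
      · rw [if_pos rfl]
        simp only [List.map_cons]
        rw [pv_sjoin_snoc, pv_sjoin_snoc, pv_getD_fold n E p.1 hp, pv_sjoin_cons,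
          show PySem.Str.join "" ((E.filter (fun pb => pb.1 == p.1)).map (fun pb => pb.2))
            = pvMarksAt E p.1 from rfl]
        simp only [String.append_assoc]

-- ---------- B-side lemmas ----------

-- B's nested collection loop is a filter of the flattened event list
theorem pv_evfold_eq (n : Int) (vp : List (Int × Int)) (acc : List (Int × String)) :
    vp.foldl (fun ev se =>
      [(se.1, " [ "), (se.1 + 6, " ] "), (se.2, " [ "), (se.2 + 6, " ] ")].foldl
        (fun ev pb => if 0 ≤ pb.1 ∧ pb.1 ≤ n then ev ++ [pb] else ev) ev) acc
    = acc ++ (vp.flatMap pvEvs).filter (fun pb => decide (0 ≤ pb.1 ∧ pb.1 ≤ n)) := by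
  induction vp generalizing acc with
  | nil => simp
  | cons se rest ih =>
      rw [List.foldl_cons, ih,
        show [(se.1, " [ "), (se.1 + 6, " ] "), (se.2, " [ "), (se.2 + 6, " ] ")] = pvEvs se
          from rfl,
        PySem.List.foldl_append_ite_eq_filter (fun pb => 0 ≤ pb.1 ∧ pb.1 ≤ n) (pvEvs se) acc,
        List.flatMap_cons, List.filter_append, List.append_assoc]

-- insertion keeps the list ordered by position
theorem pv_insertBy_pairwise (x : Int × String) (ys : List (Int × String))
    (h : ys.Pairwise (fun a b => a.1 ≤ b.1)) :
    (PySem.List.insertBy (fun a b => decide (a.1 < b.1)) x ys).Pairwise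
      (fun a b => a.1 ≤ b.1) := by
  induction ys with
  | nil => simp [PySem.List.insertBy]
  | cons y ys ih =>
      rw [List.pairwise_cons] at h
      rw [PySem.List.insertBy]
      by_cases hxy : x.1 < y.1
      · rw [if_pos (by simpa using hxy), List.pairwise_cons]
        refine ⟨?_, List.pairwise_cons.mpr h⟩
        intro z hz
        rcases List.mem_cons.mp hz with rfl | hz
        · exact le_of_lt hxy
        · exact le_trans (le_of_lt hxy) (h.1 z hz)
      · rw [if_neg (by simpa using hxy), List.pairwise_cons]
        refine ⟨?_, ih h.2⟩
        intro z hz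
        rcases (PySem.List.mem_insertBy _ _ _ _).mp hz with rfl | hz
        · omega
        · exact h.1 z hz

-- stability: inserting into an ordered list appends at its own position group
theorem pv_insertBy_filter (i : Int) (x : Int × String) (ys : List (Int × String))
    (h : ys.Pairwise (fun a b => a.1 ≤ b.1)) :
    (PySem.List.insertBy (fun a b => decide (a.1 < b.1)) x ys).filter (fun p => p.1 == i)
    = ys.filter (fun p => p.1 == i) ++ (if x.1 == i then [x] else []) := by
  induction ys with
  | nil =>
      rw [PySem.List.insertBy]
      simp [List.filter_cons]
  | cons y ys ih =>
      rw [List.pairwise_cons] at h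
      rw [PySem.List.insertBy]
      by_cases hxy : x.1 < y.1
      · rw [if_pos (by simpa using hxy)]
        by_cases hxi : x.1 = i
        · have hnil : (y :: ys).filter (fun p => p.1 == i) = [] := by
            apply List.filter_eq_nil_iff.mpr
            intro z hz
            rcases List.mem_cons.mp hz with rfl | hz
            · simp; omega
            · have := h.1 z hz; simp; omega
          rw [List.filter_cons, if_pos (by simp [hxi]), hnil]
          simp [hxi]
        · rw [show ((x :: y :: ys).filter (fun p => p.1 == i))
                = (y :: ys).filter (fun p => p.1 == i) by
              rw [List.filter_cons, if_neg (by simp [hxi])]]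
          simp [hxi]
      · rw [if_neg (by simpa using hxy), List.filter_cons, List.filter_cons, ih h.2]
        by_cases hyi : y.1 = i
        · simp [hyi]
        · simp [hyi]

-- the stable sort keeps each position group unchanged
theorem pv_foldl_ins_filter (i : Int) (E acc : List (Int × String))
    (h : acc.Pairwise (fun a b => a.1 ≤ b.1)) :
    (E.foldl (fun acc x => PySem.List.insertBy (fun a b => decide (a.1 < b.1)) x acc) acc).filter
        (fun p => p.1 == i)
    = acc.filter (fun p => p.1 == i) ++ E.filter (fun p => p.1 == i) := by
  induction E generalizing acc with
  | nil => simp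
  | cons e rest ih =>
      rw [List.foldl_cons, ih _ (pv_insertBy_pairwise e acc h),
        pv_insertBy_filter i e acc h, List.filter_cons]
      by_cases hei : e.1 = i
      · rw [if_pos (by simp [hei]), if_pos (by simp [hei])]
        simp
      · rw [if_neg (by simp [hei]), if_neg (by simp [hei])]
        simp

theorem pv_sorted_filter (i : Int) (E : List (Int × String)) :
    (PySem.List.sorted E (fun e => e.1) false).filter (fun p => p.1 == i)
    = E.filter (fun p => p.1 == i) := by
  rw [show PySem.List.sorted E (fun e => e.1) false = PySem.List.sorted E (fun e => e.1) from rfl,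
    PySem.List.sorted_eq_foldl_insertBy,
    pv_foldl_ins_filter i E [] (by simp)]
  simp

theorem pv_sorted_marksAt (i : Int) (E : List (Int × String)) :
    pvMarksAt (PySem.List.sorted E (fun e => e.1) false) i = pvMarksAt E i := by
  rw [pvMarksAt, pvMarksAt, pv_sorted_filter]

-- filtering to in-range positions does not change an in-range position group
theorem pv_filter_marksAt (n : Int) (E : List (Int × String)) (i : Int)
    (h0 : 0 ≤ i) (hn : i ≤ n) :
    pvMarksAt (E.filter (fun pb => decide (0 ≤ pb.1 ∧ pb.1 ≤ n))) i = pvMarksAt E i := by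
  rw [pvMarksAt, pvMarksAt, List.filter_filter]
  congr 2
  apply List.filter_congr
  intro x _
  by_cases hxi : x.1 = i
  · simp [hxi]; omega
  · simp [hxi]

-- B's part-collecting fold, joined, is the cursor replay
theorem pv_foldCur (DNA : String) (L : List (Int × String)) (acc : List String) (c : Nat)
    (hL : ∀ pb ∈ L, 0 ≤ pb.1) :
    PySem.Str.join ""
      ((L.foldl (fun (st : List String × Int) pb =>
          (st.1 ++ [PySem.Str.slice DNA (some st.2) (some pb.1)] ++ [pb.2], pb.1))
          (acc, (c : Int))).1
        ++ [PySem.Str.slice DNA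
            (some (L.foldl (fun (st : List String × Int) pb =>
              (st.1 ++ [PySem.Str.slice DNA (some st.2) (some pb.1)] ++ [pb.2], pb.1))
              (acc, (c : Int))).2) none])
    = PySem.Str.join "" acc ++ pvCur DNA L c := by
  induction L generalizing acc c with
  | nil => simp only [List.foldl_nil]; rw [pv_sjoin_snoc, pvCur]
  | cons pb L ih =>
      have h0 : 0 ≤ pb.1 := hL pb (by simp)
      have hcast : ((pb.1.toNat : Nat) : Int) = pb.1 := Int.toNat_of_nonneg h0
      rw [List.foldl_cons]
      have := ih (acc ++ [PySem.Str.slice DNA (some (c : Int)) (some pb.1)] ++ [pb.2])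
        pb.1.toNat (fun q hq => hL q (by simp [hq]))
      rw [hcast] at this
      rw [this, pvCur, pv_sjoin_snoc, pv_sjoin_snoc]
      simp only [String.append_assoc]

-- chars c..c+k-1 of a list, as a map over range'
theorem pv_map_range'_getD (cs : List Char) (k c : Nat) (h : c + k ≤ cs.length) :
    (List.range' c k).map (fun i => cs.getD i ' ') = (cs.drop c).take k := by
  induction k generalizing c with
  | zero => simp
  | succ k ih =>
      rw [List.range'_succ, List.map_cons, List.drop_eq_getElem_cons (by omega),
        show cs.getD c ' ' = cs[c]'(by omega) by
          rw [List.getD_eq_getElem?_getD, List.getElem?_eq_getElem (by omega)]; rfl]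
      rw [show (cs[c]'(by omega) :: cs.drop (c+1)).take (k+1)
            = cs[c]'(by omega) :: (cs.drop (c+1)).take k from rfl]
      rw [ih (c+1) (by omega)]

-- the tail slice is the join of its singleton characters
theorem pv_sliceFrom_eq (DNA : String) (c : Nat) (h : c ≤ DNA.toList.length) :
    PySem.Str.slice DNA (some (c : Int)) none
    = PySem.Str.join "" ((List.range' c (DNA.toList.length - c)).map
        (fun i => String.singleton (DNA.toList.getD i ' '))) := by
  apply String.toList_inj.mp
  rw [PySem.Str.toList_slice, PySem.Chars.slice_eq_listSlice, PySem.List.slice_from_natCast,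
    PySem.Str.toList_join, List.map_map, show ("" : String).toList = [] from rfl,
    pv_cjoin_flatten]
  have : (String.toList ∘ fun i => String.singleton (DNA.toList.getD i ' '))
      = fun i => [DNA.toList.getD i ' '] := by
    funext i; simp
  rw [this]
  rw [show ∀ (l : List Nat), (l.map (fun i => [DNA.toList.getD i ' '])).flatten
        = l.map (fun i => DNA.toList.getD i ' ') by
      intro l; induction l with
      | nil => rfl
      | cons a t ih => simp only [List.map_cons, List.flatten_cons, List.singleton_append, ih]]
  rw [pv_map_range'_getD DNA.toList (DNA.toList.length - c) c (by omega)]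
  rw [List.take_of_length_le (by simp)]

-- peeling one character off the cursor replay when every event lies strictly beyond c
theorem pv_cur_step (DNA : String) (L : List (Int × String)) (c : Nat)
    (hc : c < DNA.toList.length) (hlo : ∀ pb ∈ L, (c : Int) + 1 ≤ pb.1)
    (hhi : ∀ pb ∈ L, pb.1 ≤ (DNA.toList.length : Int)) :
    pvCur DNA L c = String.singleton (DNA.toList.getD c ' ') ++ pvCur DNA L (c + 1) := by
  have hchar : ∀ (k : Nat), c < k → k ≤ DNA.toList.length →
      PySem.Str.slice DNA (some (c : Int)) (some (k : Int))
      = String.singleton (DNA.toList.getD c ' ')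
        ++ PySem.Str.slice DNA (some ((c + 1 : Nat) : Int)) (some (k : Int)) := by
    intro k hk hkn
    apply String.toList_inj.mp
    rw [String.toList_append]
    rw [PySem.Str.toList_slice, PySem.Str.toList_slice, PySem.Chars.slice_eq_listSlice,
      PySem.Chars.slice_eq_listSlice, PySem.List.slice_natCast, PySem.List.slice_natCast]
    rw [List.drop_eq_getElem_cons (l := DNA.toList) hc,
      show k - c = (k - (c+1)) + 1 by omega]
    rw [show (DNA.toList[c] :: DNA.toList.drop (c+1)).take ((k - (c+1)) + 1)
          = DNA.toList[c] :: (DNA.toList.drop (c+1)).take (k - (c+1)) from rfl]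
    rw [show DNA.toList.getD c ' ' = DNA.toList[c]'hc by
      rw [List.getD_eq_getElem?_getD, List.getElem?_eq_getElem hc]; rfl]
    simp
  cases L with
  | nil =>
      rw [pvCur, pvCur]
      apply String.toList_inj.mp
      rw [String.toList_append]
      rw [PySem.Str.toList_slice, PySem.Str.toList_slice, PySem.Chars.slice_eq_listSlice,
        PySem.Chars.slice_eq_listSlice, PySem.List.slice_from_natCast,
        PySem.List.slice_from_natCast]
      rw [List.drop_eq_getElem_cons (l := DNA.toList) hc]
      rw [show DNA.toList.getD c ' ' = DNA.toList[c]'hc by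
        rw [List.getD_eq_getElem?_getD, List.getElem?_eq_getElem hc]; rfl]
      simp
  | cons pb L =>
      have h1 : (c : Int) + 1 ≤ pb.1 := hlo pb (by simp)
      have h2 : pb.1 ≤ (DNA.toList.length : Int) := hhi pb (by simp)
      have hcast : ((pb.1.toNat : Nat) : Int) = pb.1 := Int.toNat_of_nonneg (by omega)
      rw [pvCur, pvCur, ← hcast,
        hchar pb.1.toNat (by omega) (by omega)]
      simp only [String.append_assoc]

-- peeling a whole position group off pvR
theorem pv_marksAt_cons (pb : Int × String) (L : List (Int × String)) (i : Int) :
    pvMarksAt (pb :: L) i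
    = (if pb.1 == i then pb.2 else "") ++ pvMarksAt L i := by
  rw [pvMarksAt, List.filter_cons]
  by_cases h : pb.1 = i
  · rw [if_pos (by simp [h]), if_pos (by simp [h]), List.map_cons, pv_sjoin_cons]; rfl
  · rw [if_neg (by simp [h]), if_neg (by simp [h]), pv_empty_append]; rfl

-- the cursor replay of an ordered, in-window event list is the reference shape
theorem pv_cur_eq_R (DNA : String) (fuel : Nat) :
    ∀ (L : List (Int × String)) (c : Nat),
      (DNA.toList.length - c) + L.length ≤ fuel →
      c ≤ DNA.toList.length →
      (∀ pb ∈ L, (c : Int) ≤ pb.1) →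
      (∀ pb ∈ L, pb.1 ≤ (DNA.toList.length : Int)) →
      L.Pairwise (fun a b => a.1 ≤ b.1) →
      pvCur DNA L c = pvR DNA L c := by
  induction fuel with
  | zero =>
      intro L c hfuel hc hlo hhi hsort
      have hL : L = [] := by
        cases L with
        | nil => rfl
        | cons a b => simp at hfuel
      have hcn : c = DNA.toList.length := by omega
      subst hL hcn
      rw [pvCur, pvR]
      simp only [Nat.sub_self, List.range'_zero, List.map_nil]
      rw [pv_sjoin_nil, pv_empty_append, pvMarksAt]
      simp only [List.filter_nil, List.map_nil]
      rw [pv_sjoin_nil]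
      apply String.toList_inj.mp
      rw [PySem.Str.toList_slice, PySem.Chars.slice_eq_listSlice, PySem.List.slice_from_natCast]
      simp
  | succ fuel ih =>
      intro L c hfuel hc hlo hhi hsort
      cases L with
      | nil =>
          rw [pvCur, pvR, pv_sliceFrom_eq DNA c hc]
          have : pvMarksAt ([] : List (Int × String)) = fun _ => "" := by
            funext i; rw [pvMarksAt]; simp only [List.filter_nil, List.map_nil]
            exact pv_sjoin_nil
          rw [this]
          rw [show ((List.range' c (DNA.toList.length - c)).map
                (fun i => "" ++ String.singleton (DNA.toList.getD i ' ')))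
              = ((List.range' c (DNA.toList.length - c)).map
                (fun i => String.singleton (DNA.toList.getD i ' '))) by
            apply List.map_congr_left; intro i _; rw [pv_empty_append]]
          rw [pv_append_empty]
      | cons pb L' =>
          rw [List.pairwise_cons] at hsort
          by_cases hpc : pb.1 = (c : Int)
          · -- peel one event at the cursor position
            have hslice : PySem.Str.slice DNA (some (c : Int)) (some pb.1) = "" := by
              rw [hpc]
              apply String.toList_inj.mp
              rw [PySem.Str.toList_slice, PySem.Chars.slice_eq_listSlice,
                PySem.List.slice_natCast]
              simp
            have htoNat : pb.1.toNat = c := by omega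
            rw [pvCur, hslice, pv_empty_append, htoNat]
            rw [ih L' c (by simp only [List.length_cons] at hfuel ⊢; omega) hc
              (fun q hq => hlo q (by simp [hq])) (fun q hq => hhi q (by simp [hq])) hsort.2]
            -- now show pvR (pb :: L') c = pb.2 ++ pvR L' c
            rw [pvR, pvR]
            by_cases hcn : c < DNA.toList.length
            · rw [show DNA.toList.length - c = (DNA.toList.length - (c+1)) + 1 by omega,
                List.range'_succ, List.map_cons, List.map_cons, pv_sjoin_cons, pv_sjoin_cons]
              have hrest : (List.range' (c+1) (DNA.toList.length - (c+1))).map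
                    (fun (i : Nat) => pvMarksAt (pb :: L') (i : Int) ++ String.singleton (DNA.toList.getD i ' '))
                  = (List.range' (c+1) (DNA.toList.length - (c+1))).map
                    (fun (i : Nat) => pvMarksAt L' (i : Int) ++ String.singleton (DNA.toList.getD i ' ')) := by
                apply List.map_congr_left
                intro i hi
                have hib := List.mem_range'_1.mp hi
                rw [pv_marksAt_cons, if_neg (by simp only [beq_iff_eq]; omega), pv_empty_append]
              have hend : pvMarksAt (pb :: L') ((DNA.toList.length : Nat) : Int)
                  = pvMarksAt L' ((DNA.toList.length : Nat) : Int) := by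
                rw [pv_marksAt_cons, if_neg (by simp only [beq_iff_eq]; omega), pv_empty_append]
              rw [hrest, hend, pv_marksAt_cons, if_pos (by simp [hpc])]
              simp only [String.append_assoc]
            · have hcn' : c = DNA.toList.length := by omega
              rw [show DNA.toList.length - c = 0 by omega]
              simp only [List.range'_zero, List.map_nil]
              rw [pv_sjoin_nil, pv_empty_append, pv_empty_append, pv_marksAt_cons,
                if_pos (by simp only [beq_iff_eq]; omega)]
          · -- advance the cursor by one character
            have hlt : (c : Int) < pb.1 := lt_of_le_of_ne (hlo pb (by simp)) (Ne.symm hpc)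
            have hcn : c < DNA.toList.length := by
              have := hhi pb (by simp); omega
            have hlo' : ∀ q ∈ pb :: L', (c : Int) + 1 ≤ q.1 := by
              intro q hq
              rcases List.mem_cons.mp hq with rfl | hq
              · omega
              · have := hsort.1 q hq; omega
            rw [pv_cur_step DNA (pb :: L') c hcn hlo' hhi]
            rw [ih (pb :: L') (c+1) (by simp only [List.length_cons] at hfuel ⊢; omega) (by omega)
              hlo' hhi (List.pairwise_cons.mpr hsort)]
            -- show pvR (pb::L') c = char c ++ pvR (pb::L') (c+1), marks at c being empty
            rw [pvR, pvR,
              show DNA.toList.length - c = (DNA.toList.length - (c+1)) + 1 by omega,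
              List.range'_succ, List.map_cons, pv_sjoin_cons]
            have hmc : pvMarksAt (pb :: L') (c : Int) = "" := by
              rw [pvMarksAt]
              rw [show (pb :: L').filter (fun p => p.1 == (c : Int)) = [] by
                apply List.filter_eq_nil_iff.mpr
                intro q hq
                have := hlo' q hq
                simp; omega]
              simp only [List.map_nil]
              exact pv_sjoin_nil
            rw [hmc, pv_empty_append]
            simp only [String.append_assoc]

-- range'-indexed description of the enumerate pass
theorem pv_enum_range' (DNA : String) (E : List (Int × String)) :
    (PySem.List.enumerate DNA.toList).map
        (fun ic => pvMarksAt E ic.1 ++ String.singleton ic.2)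
    = (List.range' 0 DNA.toList.length).map
        (fun (i : Nat) => pvMarksAt E (i : Int) ++ String.singleton (DNA.toList.getD i ' ')) := by
  apply List.ext_getElem
  · simp [PySem.List.length_enumerate]
  · intro k h1 h2
    simp only [List.length_map, PySem.List.length_enumerate] at h1
    simp only [List.getElem_map, PySem.List.getElem_enumerate, List.getElem_range']
    rw [show DNA.toList.getD (0 + 1 * k) ' ' = DNA.toList[k] by
      rw [List.getD_eq_getElem?_getD]
      rw [show 0 + 1 * k = k by omega, List.getElem?_eq_getElem h1]; rfl]
    norm_num

-- ===== VERDICT (by name: the statement is the Claim_ definition above) =====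
-- B's fold starts at cursor 0 (Int literal form)
theorem pv_foldCur_zero (DNA : String) (L : List (Int × String)) (acc : List String)
    (hL : ∀ pb ∈ L, 0 ≤ pb.1) :
    PySem.Str.join ""
      ((L.foldl (fun (st : List String × Int) pb =>
          (st.1 ++ [PySem.Str.slice DNA (some st.2) (some pb.1)] ++ [pb.2], pb.1))
          (acc, (0 : Int))).1
        ++ [PySem.Str.slice DNA
            (some (L.foldl (fun (st : List String × Int) pb =>
              (st.1 ++ [PySem.Str.slice DNA (some st.2) (some pb.1)] ++ [pb.2], pb.1))
              (acc, (0 : Int))).2) none])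
    = PySem.Str.join "" acc ++ pvCur DNA L 0 := by
  have h := pv_foldCur DNA L acc 0 hL
  simp only [Nat.cast_zero] at h
  exact h

-- ===== VERDICT (by name: the statement is the Claim_ definition above) =====
theorem AnnotateValidPromoters_spec : Claim_equal_AnnotateValidPromoters := by
  intro DNA vp _
  unfold Spec_AnnotateValidPromoters AnnotateValidPromoters AnnotateValidPromoters_alt
  dsimp only
  rw [pv_fold4_eq (PySem.Str.len DNA) vp,
    pv_state_split (PySem.Str.len DNA) (vp.flatMap pvEvs) PySem.Dict.empty []]
  dsimp only
  simp only [List.nil_append]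
  have hmem : ∀ p ∈ PySem.List.enumerate DNA.toList, p.1 ≠ PySem.Str.len DNA := by
    intro p hp
    rw [PySem.List.mem_enumerate_iff] at hp
    obtain ⟨k, hk, rfl⟩ := hp
    rw [PySem.Str.len_eq]
    simp only [zero_add]
    omega
  -- B side
  rw [pv_evfold_eq (PySem.Str.len DNA) vp []]
  simp only [List.nil_append]
  set Ef : List (Int × String) := (vp.flatMap pvEvs).filter
    (fun pb => decide (0 ≤ pb.1 ∧ pb.1 ≤ PySem.Str.len DNA)) with hEf
  set S : List (Int × String) := PySem.List.sorted Ef (fun e => e.1) false with hS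
  have hSmem : ∀ pb ∈ S, 0 ≤ pb.1 ∧ pb.1 ≤ ((DNA.toList.length : Nat) : Int) := by
    intro pb hpb
    rw [hS, PySem.List.mem_sorted, hEf] at hpb
    have h2 := (List.mem_filter.mp hpb).2
    simp only [decide_eq_true_eq, PySem.Str.len_eq] at h2
    exact h2
  rw [pv_foldCur_zero DNA S [] (fun pb h => (hSmem pb h).1), pv_sjoin_nil, pv_empty_append]
  rw [pv_cur_eq_R DNA (DNA.toList.length + S.length) S 0 (by omega) (by omega)
    (fun pb h => by simpa using (hSmem pb h).1) (fun pb h => (hSmem pb h).2)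
    (by rw [hS]; exact PySem.List.sorted_pairwise Ef (fun e => e.1))]
  rw [pvR]
  have hmarks : ∀ i : Int, 0 ≤ i → i ≤ ((DNA.toList.length : Nat) : Int) →
      pvMarksAt S i = pvMarksAt (vp.flatMap pvEvs) i := by
    intro i h0 hn
    rw [hS, pv_sorted_marksAt, hEf,
      pv_filter_marksAt (PySem.Str.len DNA) (vp.flatMap pvEvs) i h0
        (by rw [PySem.Str.len_eq]; exact hn)]
  have hmapS : (List.range' 0 (DNA.toList.length - 0)).map
        (fun (i : Nat) => pvMarksAt S (i : Int) ++ String.singleton (DNA.toList.getD i ' '))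
      = (List.range' 0 DNA.toList.length).map
        (fun (i : Nat) => pvMarksAt (vp.flatMap pvEvs) (i : Int)
          ++ String.singleton (DNA.toList.getD i ' ')) := by
    rw [Nat.sub_zero]
    apply List.map_congr_left
    intro i hi
    have hib := List.mem_range'_1.mp hi
    rw [hmarks (i : Int) (by omega) (by omega)]
  rw [hmapS, ← pv_enum_range' DNA (vp.flatMap pvEvs),
    hmarks ((DNA.toList.length : Nat) : Int) (by omega) (by omega)]
  -- align A's end-of-string position with B's
  simp only [PySem.Str.len_eq]
  -- end-of-string brackets
  have hendm : pvMarksAt (vp.flatMap pvEvs) ((DNA.toList.length : Nat) : Int)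
      = PySem.Str.join "" (((vp.flatMap pvEvs).filter
          (fun p => p.1 == ((DNA.toList.length : Nat) : Int))).map (fun p => p.2)) := rfl
  by_cases hae : (((vp.flatMap pvEvs).filter
      (fun p => p.1 == ((DNA.toList.length : Nat) : Int))).map (fun p => p.2)).isEmpty
  · rw [if_pos hae, pv_outA ((DNA.toList.length : Nat) : Int) (vp.flatMap pvEvs) _ _
      (by simpa only [PySem.Str.len_eq] using hmem), pv_sjoin_nil, pv_empty_append]
    have h0 : pvMarksAt (vp.flatMap pvEvs) ((DNA.toList.length : Nat) : Int) = "" := by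
      rw [hendm, List.isEmpty_iff.mp hae, pv_sjoin_nil]
    rw [h0, pv_append_empty]
  · rw [if_neg hae, pv_sjoin_snoc, pv_outA ((DNA.toList.length : Nat) : Int) (vp.flatMap pvEvs) _ _
      (by simpa only [PySem.Str.len_eq] using hmem), pv_sjoin_nil, pv_empty_append]
    rw [hendm]
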